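-- pv_equiv track=rewrite | github.com/ClayRitterson/Custom-Cipher | CustomCipher2.py | findSpaces
-- ===== SOURCE A (Python) =====
-- def findSpaces(plainText):
--     spacesAt = []
--     spacesFound = 0
--     newText = ''
--     for i in range(len(plainText)):
--         if plainText[i] == ' ':
--             spacesAt.append(i - spacesFound)
--             spacesFound += 1
--         else:
--             newText += plainText[i].upper()
--     return newText, spacesAt
-- ===== SOURCE B (Python) =====
-- def findSpaces(plainText):
--     segments = plainText.split(' ')
--     spacesAt = []
--     total = 0
--     for seg in segments[:-1]:
--         total += len(seg)
--         spacesAt.append(total)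
--     return plainText.replace(' ', '').upper(), spacesAt
-- ===== Notes on version B (the rewrite author's own statement) =====
-- stated objective: faster
-- what changed: Replaces the per-index scan with a space counter and char-by-char string concatenation by str.split on the space character plus a running sum of segment lengths, building the cleaned text with whole-string replace and upper.
import Mathlib
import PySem

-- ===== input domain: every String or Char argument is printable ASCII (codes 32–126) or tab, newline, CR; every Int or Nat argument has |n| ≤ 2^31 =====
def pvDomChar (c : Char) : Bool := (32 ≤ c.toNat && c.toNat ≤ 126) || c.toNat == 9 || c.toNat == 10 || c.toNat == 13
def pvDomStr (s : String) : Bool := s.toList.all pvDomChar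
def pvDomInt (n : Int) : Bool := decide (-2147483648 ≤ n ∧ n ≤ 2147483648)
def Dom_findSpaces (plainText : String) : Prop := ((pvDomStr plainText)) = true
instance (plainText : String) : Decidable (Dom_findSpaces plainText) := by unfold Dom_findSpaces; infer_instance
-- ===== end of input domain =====

-- B replaces A's per-index scan (space counter, char-by-char append) by split(' ') with a running
-- sum of segment lengths plus whole-string replace/upper; objective: more idiomatic, same result.


-- ===== PORT A =====
-- A's loop over range(len(plainText)): structural recursion over the characters carrying the
-- index i and the state (spacesAt, spacesFound, newText), exactly A's updates.
def findSpacesLoop : List Char → Nat → List Int → Int → List Char → List Int × List Char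
  | [], _, spacesAt, _, newText => (spacesAt, newText)
  | c :: rest, i, spacesAt, spacesFound, newText =>
      if c = ' ' then
        findSpacesLoop rest (i + 1) (spacesAt ++ [(i : Int) - spacesFound]) (spacesFound + 1) newText
      else
        findSpacesLoop rest (i + 1) spacesAt spacesFound (newText ++ [PySem.Chars.upperChar c])

def findSpaces (plainText : String) : String × List Int :=
  let r := findSpacesLoop plainText.toList 0 [] 0 []
  (String.ofList r.2, r.1)

-- ===== PORT B =====
-- B: split on ' ', running total of segment lengths over segments[:-1]; cleaned text by replace+upper.
def findSpaces_alt (plainText : String) : String × List Int :=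
  let segments := PySem.Chars.splitOn plainText.toList [' ']
  let st := (PySem.List.slice segments none (some (-1))).foldl
      (fun (st : Int × List Int) seg => (st.1 + seg.length, st.2 ++ [st.1 + seg.length]))
      (0, [])
  (String.ofList (PySem.Chars.upper (PySem.Chars.replace plainText.toList [' '] [])), st.2)

-- ===== PRECONDITION & SPEC =====
def Spec_findSpaces (plainText : String) (out : String × List Int) : Prop := out = findSpaces_alt plainText
instance (plainText : String) (out : String × List Int) : Decidable (Spec_findSpaces plainText out) := by unfold Spec_findSpaces; infer_instance

-- ===== CLAIM (what is proved, stated in full; the proofs are below) =====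
def Claim_equal_findSpaces : Prop := ∀ (plainText : String), Dom_findSpaces plainText → Spec_findSpaces plainText (findSpaces plainText)

-- ===== LEMMAS AND PROOFS =====

-- Reference space-position list: k = number of non-space characters seen so far.
def refSpaces : List Char → Int → List Int
  | [], _ => []
  | c :: t, k => if c = ' ' then k :: refSpaces t k else refSpaces t (k + 1)

-- Reference splitter on a single space character.
def splitSp : List Char → List (List Char)
  | [] => [[]]
  | c :: t =>
      if c = ' ' then [] :: splitSp t
      else
        match splitSp t with
        | [] => [[c]]
        | s :: r => (c :: s) :: r

theorem splitSp_ne_nil (cs : List Char) : splitSp cs ≠ [] := by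
  cases cs with
  | nil => simp [splitSp]
  | cons c t =>
    simp only [splitSp]
    split
    · simp
    · cases h : splitSp t <;> simp

-- A's loop, characterised.
theorem findSpacesLoop_eq (cs : List Char) : ∀ (i : Nat) (sf : Int) (sa : List Int) (nt : List Char),
    findSpacesLoop cs i sa sf nt
      = (sa ++ refSpaces cs ((i : Int) - sf),
         nt ++ (cs.filter (fun c => c != ' ')).map PySem.Chars.upperChar) := by
  induction cs with
  | nil => intro i sf sa nt; simp [findSpacesLoop, refSpaces]
  | cons c t ih =>
    intro i sf sa nt
    by_cases h : c = ' '
    · simp only [findSpacesLoop, refSpaces, h, ih, List.filter_cons]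
      have : ((i : Int) + 1) - (sf + 1) = (i : Int) - sf := by ring
      simp [this]
    · simp only [findSpacesLoop, refSpaces, if_neg h, ih, List.filter_cons]
      have : ((i : Int) + 1) - sf = ((i : Int) - sf) + 1 := by ring
      simp [this, h, List.map_cons]

-- replace.go on the single-char pattern [' '] with empty replacement filters out the spaces.
theorem replace_go_filter : ∀ (fuel : Nat) (l acc : List Char), l.length ≤ fuel →
    PySem.Chars.replace.go [' '] [] fuel l acc = acc.reverse ++ l.filter (fun c => c != ' ') := by
  intro fuel
  induction fuel with
  | zero =>
    intro l acc h
    have : l = [] := List.eq_nil_of_length_eq_zero (Nat.le_zero.mp h)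
    subst this; simp [PySem.Chars.replace.go]
  | succ n ih =>
    intro l acc h
    cases l with
    | nil => simp [PySem.Chars.replace.go]
    | cons c t =>
      by_cases hc : c = ' '
      · subst hc
        have hp : List.isPrefixOf [' '] (' ' :: t) = true := by simp [List.isPrefixOf]
        rw [show PySem.Chars.replace.go [' '] [] (n + 1) (' ' :: t) acc
              = PySem.Chars.replace.go [' '] [] n t acc from by
            simp only [PySem.Chars.replace.go, hp]; simp]
        rw [ih t acc (by simp at h; omega)]
        simp
      · have hp : List.isPrefixOf [' '] (c :: t) = false := by
          have hne : (' ' == c) = false := by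
            simp only [beq_eq_false_iff_ne]; exact Ne.symm hc
          simp [List.isPrefixOf, hne]
        rw [show PySem.Chars.replace.go [' '] [] (n + 1) (c :: t) acc
              = PySem.Chars.replace.go [' '] [] n t (c :: acc) from by
            simp only [PySem.Chars.replace.go, hp]; simp]
        rw [ih t (c :: acc) (by simp at h; omega)]
        simp [hc]

theorem replace_filter (cs : List Char) :
    PySem.Chars.replace cs [' '] [] = cs.filter (fun c => c != ' ') := by
  simp only [PySem.Chars.replace, List.isEmpty_cons, Bool.false_eq_true, if_false]
  exact replace_go_filter cs.length cs [] (le_refl _)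

-- splitOn.go on the single-char separator [' '] computes splitSp.
def consHead (x : List Char) : List (List Char) → List (List Char)
  | [] => [x]
  | s :: r => (x ++ s) :: r

theorem splitOn_go_splitSp : ∀ (fuel : Nat) (l cur : List Char) (acc : List (List Char)),
    l.length < fuel →
    PySem.Chars.splitOn.go [' '] fuel l cur acc = acc.reverse ++ consHead cur.reverse (splitSp l) := by
  intro fuel
  induction fuel with
  | zero => intro l cur acc h; omega
  | succ n ih =>
    intro l cur acc h
    cases l with
    | nil => simp [PySem.Chars.splitOn.go, splitSp, consHead]
    | cons c t =>
      by_cases hc : c = ' '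
      · subst hc
        have hp : List.isPrefixOf [' '] (' ' :: t) = true := by simp [List.isPrefixOf]
        rw [show PySem.Chars.splitOn.go [' '] (n + 1) (' ' :: t) cur acc
              = PySem.Chars.splitOn.go [' '] n t [] (cur.reverse :: acc) from by
            simp only [PySem.Chars.splitOn.go, hp]; simp]
        rw [ih t [] (cur.reverse :: acc) (by simp at h; omega)]
        simp only [splitSp, reduceIte]
        cases hs : splitSp t with
        | nil => exact absurd hs (splitSp_ne_nil t)
        | cons s r => simp [consHead]
      · have hp : List.isPrefixOf [' '] (c :: t) = false := by
          have hne : (' ' == c) = false := by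
            simp only [beq_eq_false_iff_ne]; exact Ne.symm hc
          simp [List.isPrefixOf, hne]
        rw [show PySem.Chars.splitOn.go [' '] (n + 1) (c :: t) cur acc
              = PySem.Chars.splitOn.go [' '] n t (c :: cur) acc from by
            simp only [PySem.Chars.splitOn.go, hp]; simp]
        rw [ih t (c :: cur) acc (by simp at h ⊢; omega)]
        simp only [splitSp, if_neg hc]
        cases hs : splitSp t with
        | nil => exact absurd hs (splitSp_ne_nil t)
        | cons s r => simp [consHead]

theorem splitOn_splitSp (cs : List Char) : PySem.Chars.splitOn cs [' '] = splitSp cs := by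
  simp only [PySem.Chars.splitOn]
  rw [splitOn_go_splitSp (cs.length + 1) cs [] [] (by omega)]
  cases hs : splitSp cs with
  | nil => exact absurd hs (splitSp_ne_nil cs)
  | cons s r => simp [consHead]

-- B's fold over segments[:-1], characterised through g.
def gSeg : List (List Char) → Int → List Int
  | [], _ => []
  | [_], _ => []
  | s :: r :: rr, k => (k + s.length) :: gSeg (r :: rr) (k + s.length)

theorem foldl_dropLast_gSeg : ∀ (segs : List (List Char)) (k : Int) (sa : List Int),
    (segs.dropLast.foldl
      (fun (st : Int × List Int) seg => (st.1 + seg.length, st.2 ++ [st.1 + seg.length]))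
      (k, sa)).2 = sa ++ gSeg segs k := by
  intro segs
  induction segs with
  | nil => intro k sa; simp [gSeg]
  | cons s r ih =>
    intro k sa
    cases r with
    | nil => simp [gSeg]
    | cons s' rr =>
      simp only [List.dropLast_cons₂, List.foldl_cons]
      rw [ih]
      simp [gSeg]

theorem gSeg_splitSp (cs : List Char) : ∀ (k : Int), gSeg (splitSp cs) k = refSpaces cs k := by
  induction cs with
  | nil => intro k; simp [splitSp, gSeg, refSpaces]
  | cons c t ih =>
    intro k
    by_cases hc : c = ' '
    · subst hc
      simp only [splitSp, refSpaces, reduceIte]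
      cases hs : splitSp t with
      | nil => exact absurd hs (splitSp_ne_nil t)
      | cons s r =>
        have h2 := ih k
        rw [hs] at h2
        have e : gSeg ([] :: s :: r) k = k :: gSeg (s :: r) k := by simp [gSeg]
        rw [e, h2]
    · simp only [splitSp, refSpaces, if_neg hc]
      cases hs : splitSp t with
      | nil => exact absurd hs (splitSp_ne_nil t)
      | cons s r =>
        have h2 := ih (k + 1)
        rw [hs] at h2
        have e : gSeg ((c :: s) :: r) k = gSeg (s :: r) (k + 1) := by
          cases r with
          | nil => simp [gSeg]
          | cons s' rr =>
            have harg : k + ((c :: s).length : Int) = k + 1 + (s.length : Int) := by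
              push_cast [List.length_cons]; ring
            simp only [gSeg, List.length_cons] at harg ⊢
            rw [harg]
        exact e.trans h2

theorem slice_neg_one (xs : List (List Char)) :
    PySem.List.slice xs none (some (-1)) = xs.dropLast := by
  simp only [PySem.List.slice, Int.reduceNeg, Order.lt_one_iff, PySem.List.clampIdx_neg_ofNat,
    tsub_zero, List.drop_zero]
  rw [List.dropLast_eq_take]

-- ===== VERDICT (by name: the statement is the Claim_ definition above) =====
theorem findSpaces_spec : Claim_equal_findSpaces := by
  intro plainText _
  unfold Spec_findSpaces findSpaces findSpaces_alt
  simp only [findSpacesLoop_eq, slice_neg_one, splitOn_splitSp, replace_filter]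
  rw [foldl_dropLast_gSeg]
  simp only [List.nil_append, gSeg_splitSp]
  simp [PySem.Chars.upper]
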